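-- pv_equiv track=rewrite | github.com/jdm4pku/iReDev | backend/agent/archivist.py | _retrieve_relevant_context
-- ===== SOURCE A (Python) =====
-- from typing import Any, Dict, List, Optional, Tuple
--
-- def _retrieve_relevant_context(
--     section_header: str,
--     brd: str,
--     userrd: str,
--     syrs: str,
--     max_chars: int = 3000,
-- ) -> str:
--     """
--     根据章节标题启发式选取最相关的上游文档片段，控制总长度。
--
--     检索策略：
--       - Introduction / Scope / References → BRD 优先
--       - User Classes / Features → UserRD + SyRS
--       - Quality / Performance / Security → SyRS 优先
--       - External Interface → SyRS
--       - Data / Appendix → UserRD + SyRS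
--       - 其他 → 均匀截取
--     """
--     header_lower = section_header.lower()
--
--     snippets: List[str] = []
--
--     # ---- 权重决策 ----
--     if any(kw in header_lower for kw in ("introduction", "scope", "purpose", "reference", "convention")):
--         snippets.append(f"### BRD (excerpt)\n{brd[:max_chars]}")
--         snippets.append(f"### SyRS (excerpt)\n{syrs[:max_chars // 2]}")
--
--     elif any(kw in header_lower for kw in ("user class", "user", "feature", "system feature")):
--         snippets.append(f"### UserRD (excerpt)\n{userrd[:max_chars]}")
--         snippets.append(f"### SyRS (excerpt)\n{syrs[:max_chars]}")
--
--     elif any(kw in header_lower for kw in ("quality", "performance", "security", "safety", "usability")):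
--         snippets.append(f"### SyRS (excerpt)\n{syrs[:max_chars]}")
--         snippets.append(f"### UserRD (excerpt)\n{userrd[:max_chars // 3]}")
--
--     elif any(kw in header_lower for kw in ("interface", "external")):
--         snippets.append(f"### SyRS (excerpt)\n{syrs[:max_chars]}")
--
--     elif any(kw in header_lower for kw in ("data", "appendix", "glossary", "model")):
--         snippets.append(f"### UserRD (excerpt)\n{userrd[:max_chars // 2]}")
--         snippets.append(f"### SyRS (excerpt)\n{syrs[:max_chars // 2]}")
--
--     elif any(kw in header_lower for kw in ("overall", "description", "product", "environment", "constraint",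
--                                              "assumption", "operating")):
--         snippets.append(f"### BRD (excerpt)\n{brd[:max_chars // 2]}")
--         snippets.append(f"### SyRS (excerpt)\n{syrs[:max_chars // 2]}")
--         snippets.append(f"### UserRD (excerpt)\n{userrd[:max_chars // 3]}")
--
--     elif any(kw in header_lower for kw in ("internationalization", "localization", "other")):
--         snippets.append(f"### SyRS (excerpt)\n{syrs[:max_chars // 2]}")
--         snippets.append(f"### BRD (excerpt)\n{brd[:max_chars // 3]}")
--
--     else:
--         third = max_chars // 3
--         snippets.append(f"### BRD (excerpt)\n{brd[:third]}")
--         snippets.append(f"### UserRD (excerpt)\n{userrd[:third]}")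
--         snippets.append(f"### SyRS (excerpt)\n{syrs[:third]}")
--
--     return "\n\n".join(snippets)
-- ===== SOURCE B (Python) =====
-- def _retrieve_relevant_context(
--     section_header: str,
--     brd: str,
--     userrd: str,
--     syrs: str,
--     max_chars: int = 3000,
-- ) -> str:
--     """Two-phase re-implementation.
--
--     Phase 1: instead of testing branch conditions one after another, scan one
--     flat keyword -> priority map, collect the priority of every keyword that
--     occurs in the header, and take the MINIMUM (7 = default when nothing
--     matches).  This is correct because the original first-matching-branch is
--     exactly the smallest branch index whose keyword group has a hit.
--
--     Phase 2: look the category up in a plan table (source label, char limit per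
--     snippet) and render it with one formatter.
--     """
--     header_lower = section_header.lower()
--
--     KEYWORDS = [
--         ("introduction", 0), ("scope", 0), ("purpose", 0), ("reference", 0), ("convention", 0),
--         ("user class", 1), ("user", 1), ("feature", 1), ("system feature", 1),
--         ("quality", 2), ("performance", 2), ("security", 2), ("safety", 2), ("usability", 2),
--         ("interface", 3), ("external", 3),
--         ("data", 4), ("appendix", 4), ("glossary", 4), ("model", 4),
--         ("overall", 5), ("description", 5), ("product", 5), ("environment", 5),
--         ("constraint", 5), ("assumption", 5), ("operating", 5),
--         ("internationalization", 6), ("localization", 6), ("other", 6),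
--     ]
--
--     hits = [prio for kw, prio in KEYWORDS if kw in header_lower]
--     category = min(hits) if hits else 7
--
--     half, third = max_chars // 2, max_chars // 3
--     PLANS = {
--         0: [("BRD", max_chars), ("SyRS", half)],
--         1: [("UserRD", max_chars), ("SyRS", max_chars)],
--         2: [("SyRS", max_chars), ("UserRD", third)],
--         3: [("SyRS", max_chars)],
--         4: [("UserRD", half), ("SyRS", half)],
--         5: [("BRD", half), ("SyRS", half), ("UserRD", third)],
--         6: [("SyRS", half), ("BRD", third)],
--         7: [("BRD", third), ("UserRD", third), ("SyRS", third)],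
--     }
--     sources = {"BRD": brd, "UserRD": userrd, "SyRS": syrs}
--
--     return "\n\n".join(
--         f"### {name} (excerpt)\n{sources[name][:limit]}"
--         for name, limit in PLANS[category]
--     )
-- ===== Notes on version B (the rewrite author's own statement) =====
-- stated objective: alternative
-- what changed: Replaces A's seven-branch if/elif chain by a two-phase algorithm: one flat scan over a keyword-to-priority map whose minimum matched priority picks the category (first matching branch = least priority with a hit), then a plan-table lookup rendered by one formatter.
import Mathlib
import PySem

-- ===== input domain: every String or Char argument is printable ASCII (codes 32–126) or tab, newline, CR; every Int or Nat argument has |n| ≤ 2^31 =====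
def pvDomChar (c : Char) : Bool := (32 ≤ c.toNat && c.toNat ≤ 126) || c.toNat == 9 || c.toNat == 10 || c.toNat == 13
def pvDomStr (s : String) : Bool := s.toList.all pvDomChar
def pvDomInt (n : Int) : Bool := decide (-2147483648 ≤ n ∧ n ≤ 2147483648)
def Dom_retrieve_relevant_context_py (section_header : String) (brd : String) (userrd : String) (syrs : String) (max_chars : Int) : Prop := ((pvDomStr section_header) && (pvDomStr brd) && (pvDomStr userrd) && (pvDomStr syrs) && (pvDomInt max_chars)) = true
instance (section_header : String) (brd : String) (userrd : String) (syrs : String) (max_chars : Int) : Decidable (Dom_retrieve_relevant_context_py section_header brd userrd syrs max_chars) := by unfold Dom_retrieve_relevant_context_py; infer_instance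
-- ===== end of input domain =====

-- B replaces A's if/elif chain by a two-phase algorithm: category = minimum priority over one flat
-- keyword→priority scan, then a plan-table lookup — objective: alternative.

-- ===== PORT A =====
-- literal if/elif chain, one `any`-over-keywords test per branch, snippets appended in order
def retrieve_relevant_context_py (section_header : String) (brd : String) (userrd : String) (syrs : String) (max_chars : Int) : String :=
  let header_lower := PySem.Str.lower section_header
  let cut : String → Int → String := fun s n => PySem.Str.slice s none (some n)
  let snippets : List String :=
    if ["introduction", "scope", "purpose", "reference", "convention"].any
         (fun kw => PySem.Str.isIn kw header_lower) then
      [("### BRD (excerpt)\n" ++ cut brd max_chars),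
       ("### SyRS (excerpt)\n" ++ cut syrs (PySem.Int.floordiv max_chars 2))]
    else if ["user class", "user", "feature", "system feature"].any
         (fun kw => PySem.Str.isIn kw header_lower) then
      [("### UserRD (excerpt)\n" ++ cut userrd max_chars),
       ("### SyRS (excerpt)\n" ++ cut syrs max_chars)]
    else if ["quality", "performance", "security", "safety", "usability"].any
         (fun kw => PySem.Str.isIn kw header_lower) then
      [("### SyRS (excerpt)\n" ++ cut syrs max_chars),
       ("### UserRD (excerpt)\n" ++ cut userrd (PySem.Int.floordiv max_chars 3))]
    else if ["interface", "external"].any (fun kw => PySem.Str.isIn kw header_lower) then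
      [("### SyRS (excerpt)\n" ++ cut syrs max_chars)]
    else if ["data", "appendix", "glossary", "model"].any
         (fun kw => PySem.Str.isIn kw header_lower) then
      [("### UserRD (excerpt)\n" ++ cut userrd (PySem.Int.floordiv max_chars 2)),
       ("### SyRS (excerpt)\n" ++ cut syrs (PySem.Int.floordiv max_chars 2))]
    else if ["overall", "description", "product", "environment", "constraint", "assumption",
             "operating"].any (fun kw => PySem.Str.isIn kw header_lower) then
      [("### BRD (excerpt)\n" ++ cut brd (PySem.Int.floordiv max_chars 2)),
       ("### SyRS (excerpt)\n" ++ cut syrs (PySem.Int.floordiv max_chars 2)),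
       ("### UserRD (excerpt)\n" ++ cut userrd (PySem.Int.floordiv max_chars 3))]
    else if ["internationalization", "localization", "other"].any
         (fun kw => PySem.Str.isIn kw header_lower) then
      [("### SyRS (excerpt)\n" ++ cut syrs (PySem.Int.floordiv max_chars 2)),
       ("### BRD (excerpt)\n" ++ cut brd (PySem.Int.floordiv max_chars 3))]
    else
      let third := PySem.Int.floordiv max_chars 3
      [("### BRD (excerpt)\n" ++ cut brd third),
       ("### UserRD (excerpt)\n" ++ cut userrd third),
       ("### SyRS (excerpt)\n" ++ cut syrs third)]
  PySem.Str.join "\n\n" snippets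

-- ===== PORT B =====
-- Source B's flat keyword → priority map (the KEYWORDS constant)
def pvKeywords : List (String × Int) :=
  [("introduction", 0), ("scope", 0), ("purpose", 0), ("reference", 0), ("convention", 0),
   ("user class", 1), ("user", 1), ("feature", 1), ("system feature", 1),
   ("quality", 2), ("performance", 2), ("security", 2), ("safety", 2), ("usability", 2),
   ("interface", 3), ("external", 3),
   ("data", 4), ("appendix", 4), ("glossary", 4), ("model", 4),
   ("overall", 5), ("description", 5), ("product", 5), ("environment", 5),
   ("constraint", 5), ("assumption", 5), ("operating", 5),
   ("internationalization", 6), ("localization", 6), ("other", 6)]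

def retrieve_relevant_context_py_alt (section_header : String) (brd : String) (userrd : String) (syrs : String) (max_chars : Int) : String :=
  let hl := PySem.Str.lower section_header
  -- hits = [prio for kw, prio in KEYWORDS if kw in header_lower]; category = min(hits) if hits else 7
  let hits : List Int := (pvKeywords.filter (fun q => PySem.Str.isIn q.1 hl)).map (fun q => q.2)
  let category : Int :=
    match PySem.List.min? hits (fun x => x) with
    | some m => m
    | none => 7
  let half := PySem.Int.floordiv max_chars 2
  let third := PySem.Int.floordiv max_chars 3
  let plans : PySem.Dict Int (List (String × Int)) :=
    PySem.Dict.ofList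
      [(0, [("BRD", max_chars), ("SyRS", half)]),
       (1, [("UserRD", max_chars), ("SyRS", max_chars)]),
       (2, [("SyRS", max_chars), ("UserRD", third)]),
       (3, [("SyRS", max_chars)]),
       (4, [("UserRD", half), ("SyRS", half)]),
       (5, [("BRD", half), ("SyRS", half), ("UserRD", third)]),
       (6, [("SyRS", half), ("BRD", third)]),
       (7, [("BRD", third), ("UserRD", third), ("SyRS", third)])]
  let sources : PySem.Dict String String :=
    PySem.Dict.ofList [("BRD", brd), ("UserRD", userrd), ("SyRS", syrs)]
  -- PLANS[category] / sources[name] can never miss (category ∈ 0..7, the labels come from PLANS),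
  -- so Python's [] lookups are ported as getD with defaults that are never used
  PySem.Str.join "\n\n" ((PySem.Dict.getD plans category []).map (fun q =>
    "### " ++ q.1 ++ " (excerpt)\n"
      ++ PySem.Str.slice (PySem.Dict.getD sources q.1 "") none (some q.2)))

-- ===== PRECONDITION & SPEC =====
def Spec_retrieve_relevant_context_py (section_header : String) (brd : String) (userrd : String) (syrs : String) (max_chars : Int) (out : String) : Prop := out = retrieve_relevant_context_py_alt section_header brd userrd syrs max_chars
instance (section_header : String) (brd : String) (userrd : String) (syrs : String) (max_chars : Int) (out : String) : Decidable (Spec_retrieve_relevant_context_py section_header brd userrd syrs max_chars out) := by unfold Spec_retrieve_relevant_context_py; infer_instance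

-- ===== CLAIM =====
def Claim_equal_retrieve_relevant_context_py : Prop := ∀ (section_header : String) (brd : String) (userrd : String) (syrs : String) (max_chars : Int), Dom_retrieve_relevant_context_py section_header brd userrd syrs max_chars → Spec_retrieve_relevant_context_py section_header brd userrd syrs max_chars (retrieve_relevant_context_py section_header brd userrd syrs max_chars)

-- ===== LEMMAS AND PROOFS =====

-- Source B's hits list, decomposed into A's seven keyword groups (each tagged with its branch index)
theorem pvHits_eq (p : String → Bool) :
    (pvKeywords.filter (fun q => p q.1)).map (fun q => q.2)
      = (["introduction", "scope", "purpose", "reference", "convention"].filter p).map (fun _ => (0:Int))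
        ++ (["user class", "user", "feature", "system feature"].filter p).map (fun _ => (1:Int))
        ++ (["quality", "performance", "security", "safety", "usability"].filter p).map (fun _ => (2:Int))
        ++ (["interface", "external"].filter p).map (fun _ => (3:Int))
        ++ (["data", "appendix", "glossary", "model"].filter p).map (fun _ => (4:Int))
        ++ (["overall", "description", "product", "environment", "constraint", "assumption", "operating"].filter p).map (fun _ => (5:Int))
        ++ (["internationalization", "localization", "other"].filter p).map (fun _ => (6:Int)) := by
  have h : pvKeywords
      = ["introduction", "scope", "purpose", "reference", "convention"].map (fun k => (k, (0:Int)))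
        ++ ["user class", "user", "feature", "system feature"].map (fun k => (k, (1:Int)))
        ++ ["quality", "performance", "security", "safety", "usability"].map (fun k => (k, (2:Int)))
        ++ ["interface", "external"].map (fun k => (k, (3:Int)))
        ++ ["data", "appendix", "glossary", "model"].map (fun k => (k, (4:Int)))
        ++ ["overall", "description", "product", "environment", "constraint", "assumption", "operating"].map (fun k => (k, (5:Int)))
        ++ ["internationalization", "localization", "other"].map (fun k => (k, (6:Int))) := by rfl
  rw [h]
  simp only [List.filter_append, List.filter_map, List.map_append, List.map_map, Function.comp_def]

-- Python's min of a list of ints is its least member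
theorem pvMin?_id_eq (l : List Int) (g : Int) (hmem : g ∈ l) (hle : ∀ x ∈ l, g ≤ x) :
    PySem.List.min? l (fun x => x) = some g := by
  cases h : PySem.List.min? l (fun x => x) with
  | none => rw [PySem.List.min?_eq_none_iff] at h; simp [h] at hmem
  | some m =>
    have h1 := hle m (PySem.List.min?_mem h)
    have h2 := PySem.List.min?_isMin h g hmem
    simp only [h1.antisymm h2]

-- a group with no hit contributes nothing
theorem pvFilter_nil {p : String → Bool} {l : List String} (h : ¬ l.any p = true) :
    l.filter p = [] := by
  simp only [List.any_eq_true, not_exists, not_and] at h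
  exact List.filter_eq_nil_iff.mpr (by intro a ha; simp [h a ha])

-- ===== VERDICT =====
set_option maxHeartbeats 2000000 in
theorem retrieve_relevant_context_py_spec : Claim_equal_retrieve_relevant_context_py := by
  intro sh brd userrd syrs mc _
  show _ = _
  simp only [retrieve_relevant_context_py, retrieve_relevant_context_py_alt]
  set p : String → Bool := fun kw => PySem.Str.isIn kw (PySem.Str.lower sh) with hp
  have hmin : ∀ g : Int, g ∈ (pvKeywords.filter (fun q => p q.1)).map (fun q => q.2) →
      (∀ x ∈ (pvKeywords.filter (fun q => p q.1)).map (fun q => q.2), g ≤ x) →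
      PySem.List.min? ((pvKeywords.filter (fun q => p q.1)).map (fun q => q.2)) (fun x => x) = some g :=
    fun g => pvMin?_id_eq _ g
  by_cases h0 : ["introduction", "scope", "purpose", "reference", "convention"].any p = true
  · obtain ⟨k, hk, hpk⟩ := List.any_eq_true.mp h0
    rw [if_pos h0, hmin 0 ?_ ?_]
    · rfl
    · rw [pvHits_eq p]
      exact List.mem_append_left _ (List.mem_append_left _ (List.mem_append_left _
        (List.mem_append_left _ (List.mem_append_left _ (List.mem_append_left _
          (List.mem_map_of_mem (List.mem_filter.mpr ⟨hk, hpk⟩)))))))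
    · rw [pvHits_eq p]
      intro x hx
      simp only [List.mem_append, List.mem_map, List.mem_filter] at hx
      rcases hx with ((((((⟨_,_,h⟩|⟨_,_,h⟩)|⟨_,_,h⟩)|⟨_,_,h⟩)|⟨_,_,h⟩)|⟨_,_,h⟩)|⟨_,_,h⟩) <;> omega
  · by_cases h1 : ["user class", "user", "feature", "system feature"].any p = true
    · obtain ⟨k, hk, hpk⟩ := List.any_eq_true.mp h1
      rw [if_neg h0, if_pos h1, hmin 1 ?_ ?_]
      · rfl
      · rw [pvHits_eq p]
        exact List.mem_append_left _ (List.mem_append_left _ (List.mem_append_left _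
          (List.mem_append_left _ (List.mem_append_left _ (List.mem_append_right _
            (List.mem_map_of_mem (List.mem_filter.mpr ⟨hk, hpk⟩)))))))
      · rw [pvHits_eq p, pvFilter_nil h0]
        intro x hx
        simp only [List.map_nil, List.nil_append, List.mem_append, List.mem_map, List.mem_filter] at hx
        rcases hx with (((((⟨_,_,h⟩|⟨_,_,h⟩)|⟨_,_,h⟩)|⟨_,_,h⟩)|⟨_,_,h⟩)|⟨_,_,h⟩) <;> omega
    · by_cases h2 : ["quality", "performance", "security", "safety", "usability"].any p = true
      · obtain ⟨k, hk, hpk⟩ := List.any_eq_true.mp h2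
        rw [if_neg h0, if_neg h1, if_pos h2, hmin 2 ?_ ?_]
        · rfl
        · rw [pvHits_eq p]
          exact List.mem_append_left _ (List.mem_append_left _ (List.mem_append_left _
            (List.mem_append_left _ (List.mem_append_right _
              (List.mem_map_of_mem (List.mem_filter.mpr ⟨hk, hpk⟩))))))
        · rw [pvHits_eq p, pvFilter_nil h0, pvFilter_nil h1]
          intro x hx
          simp only [List.map_nil, List.nil_append, List.mem_append, List.mem_map, List.mem_filter] at hx
          rcases hx with ((((⟨_,_,h⟩|⟨_,_,h⟩)|⟨_,_,h⟩)|⟨_,_,h⟩)|⟨_,_,h⟩) <;> omega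
      · by_cases h3 : ["interface", "external"].any p = true
        · obtain ⟨k, hk, hpk⟩ := List.any_eq_true.mp h3
          rw [if_neg h0, if_neg h1, if_neg h2, if_pos h3, hmin 3 ?_ ?_]
          · rfl
          · rw [pvHits_eq p]
            exact List.mem_append_left _ (List.mem_append_left _ (List.mem_append_left _
              (List.mem_append_right _
                (List.mem_map_of_mem (List.mem_filter.mpr ⟨hk, hpk⟩)))))
          · rw [pvHits_eq p, pvFilter_nil h0, pvFilter_nil h1, pvFilter_nil h2]
            intro x hx
            simp only [List.map_nil, List.nil_append, List.mem_append, List.mem_map, List.mem_filter] at hx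
            rcases hx with (((⟨_,_,h⟩|⟨_,_,h⟩)|⟨_,_,h⟩)|⟨_,_,h⟩) <;> omega
        · by_cases h4 : ["data", "appendix", "glossary", "model"].any p = true
          · obtain ⟨k, hk, hpk⟩ := List.any_eq_true.mp h4
            rw [if_neg h0, if_neg h1, if_neg h2, if_neg h3, if_pos h4, hmin 4 ?_ ?_]
            · rfl
            · rw [pvHits_eq p]
              exact List.mem_append_left _ (List.mem_append_left _ (List.mem_append_right _
                (List.mem_map_of_mem (List.mem_filter.mpr ⟨hk, hpk⟩))))
            · rw [pvHits_eq p, pvFilter_nil h0, pvFilter_nil h1, pvFilter_nil h2, pvFilter_nil h3]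
              intro x hx
              simp only [List.map_nil, List.nil_append, List.mem_append, List.mem_map, List.mem_filter] at hx
              rcases hx with ((⟨_,_,h⟩|⟨_,_,h⟩)|⟨_,_,h⟩) <;> omega
          · by_cases h5 : ["overall", "description", "product", "environment", "constraint",
                "assumption", "operating"].any p = true
            · obtain ⟨k, hk, hpk⟩ := List.any_eq_true.mp h5
              rw [if_neg h0, if_neg h1, if_neg h2, if_neg h3, if_neg h4, if_pos h5, hmin 5 ?_ ?_]
              · rfl
              · rw [pvHits_eq p]
                exact List.mem_append_left _ (List.mem_append_right _
                  (List.mem_map_of_mem (List.mem_filter.mpr ⟨hk, hpk⟩)))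
              · rw [pvHits_eq p, pvFilter_nil h0, pvFilter_nil h1, pvFilter_nil h2, pvFilter_nil h3,
                  pvFilter_nil h4]
                intro x hx
                simp only [List.map_nil, List.nil_append, List.mem_append, List.mem_map, List.mem_filter] at hx
                rcases hx with (⟨_,_,h⟩|⟨_,_,h⟩) <;> omega
            · by_cases h6 : ["internationalization", "localization", "other"].any p = true
              · obtain ⟨k, hk, hpk⟩ := List.any_eq_true.mp h6
                rw [if_neg h0, if_neg h1, if_neg h2, if_neg h3, if_neg h4, if_neg h5, if_pos h6,
                  hmin 6 ?_ ?_]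
                · rfl
                · rw [pvHits_eq p]
                  exact List.mem_append_right _
                    (List.mem_map_of_mem (List.mem_filter.mpr ⟨hk, hpk⟩))
                · rw [pvHits_eq p, pvFilter_nil h0, pvFilter_nil h1, pvFilter_nil h2, pvFilter_nil h3,
                    pvFilter_nil h4, pvFilter_nil h5]
                  intro x hx
                  simp only [List.map_nil, List.nil_append, List.mem_map, List.mem_filter] at hx
                  rcases hx with ⟨_,_,h⟩; omega
              · have hnil : (pvKeywords.filter (fun q => p q.1)).map (fun q => q.2) = [] := by
                  rw [pvHits_eq p, pvFilter_nil h0, pvFilter_nil h1, pvFilter_nil h2, pvFilter_nil h3,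
                    pvFilter_nil h4, pvFilter_nil h5, pvFilter_nil h6]
                  rfl
                rw [if_neg h0, if_neg h1, if_neg h2, if_neg h3, if_neg h4, if_neg h5, if_neg h6,
                  (PySem.List.min?_eq_none_iff _ _).mpr hnil]
                rfl
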